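-- pv_equiv track=rewrite | github.com/tony102741/firmware_project | src/core/analyzer/scoring.py | _proximity_hit
-- ===== SOURCE A (Python) =====
-- _PROXIMITY_WINDOW = 30
--
-- def _proximity_hit(lower_strings, set_a, set_b, window=_PROXIMITY_WINDOW):
--     """
--     Return True if any string matching set_a appears within `window` indices
--     of any string matching set_b in the ordered string table.
--
--     String-table order approximates address order: strings from the same
--     function tend to cluster, so proximity is a lightweight same-function proxy.
--     O(|matches_a| × |matches_b|) — both sets are typically small (< 50).
--     """
--     idx_a = [i for i, s in enumerate(lower_strings)
--              if any(k in s for k in set_a)]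
--     if not idx_a:
--         return False
--     idx_b = set(i for i, s in enumerate(lower_strings)
--                 if any(k in s for k in set_b))
--     if not idx_b:
--         return False
--     return any(
--         any(abs(ia - ib) <= window for ib in idx_b)
--         for ia in idx_a
--     )
-- ===== SOURCE B (Python) =====
-- _PROXIMITY_WINDOW = 30
--
-- def _proximity_hit(lower_strings, set_a, set_b, window=_PROXIMITY_WINDOW):
--     """Single left-to-right pass: remember the most recent a-match and b-match
--     indices; a hit exists iff some index matches one set within `window` of the
--     most recent match of the other set."""
--     last_a = None
--     last_b = None
--     for i, s in enumerate(lower_strings):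
--         a = any(k in s for k in set_a)
--         b = any(k in s for k in set_b)
--         if a:
--             last_a = i
--         if b:
--             last_b = i
--         if a and last_b is not None and i - last_b <= window:
--             return True
--         if b and last_a is not None and i - last_a <= window:
--             return True
--     return False
-- ===== Notes on version B (the rewrite author's own statement) =====
-- stated objective: faster
-- what changed: Replaced A's build-both-matched-index-lists-then-compare-all-pairs strategy by a single left-to-right pass that tracks only the most recent index matching each set and reports a hit as soon as the current index matching one set is within the window of the most recent match of the other set.
import Mathlib
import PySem

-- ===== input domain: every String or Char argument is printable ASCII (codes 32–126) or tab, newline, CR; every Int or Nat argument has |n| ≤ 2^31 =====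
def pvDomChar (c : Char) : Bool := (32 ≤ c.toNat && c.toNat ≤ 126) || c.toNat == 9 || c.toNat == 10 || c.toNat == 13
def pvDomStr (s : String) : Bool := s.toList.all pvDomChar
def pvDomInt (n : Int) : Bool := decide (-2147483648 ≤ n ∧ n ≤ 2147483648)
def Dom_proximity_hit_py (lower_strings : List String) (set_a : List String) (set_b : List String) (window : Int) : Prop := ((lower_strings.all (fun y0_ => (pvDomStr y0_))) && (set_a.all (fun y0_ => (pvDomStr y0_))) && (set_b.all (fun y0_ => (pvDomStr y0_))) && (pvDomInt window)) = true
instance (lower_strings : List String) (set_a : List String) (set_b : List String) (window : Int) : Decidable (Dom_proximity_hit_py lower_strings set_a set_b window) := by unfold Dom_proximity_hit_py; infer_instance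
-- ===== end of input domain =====

-- B replaces A's all-pairs scan over the two matched-index lists by a single
-- left-to-right pass that tracks the most recent match of each set (alternative
-- decomposition; asymptotically fewer index comparisons).


-- ===== PORT A =====
def proximity_hit_py (lower_strings : List String) (set_a : List String) (set_b : List String) (window : Int) : Bool :=
  let idx_a := ((PySem.List.enumerate lower_strings 0).filter
      (fun p => set_a.any (fun k => PySem.Str.isIn k p.2))).map (fun p => p.1)
  if idx_a = [] then false
  else
    let idx_b := PySem.Set.ofList (((PySem.List.enumerate lower_strings 0).filter
        (fun p => set_b.any (fun k => PySem.Str.isIn k p.2))).map (fun p => p.1))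
    if idx_b = [] then false
    else idx_a.any (fun ia => idx_b.any (fun ib => decide (|ia - ib| ≤ window)))

-- ===== PORT B =====
def pvNearB (w : Int) (o : Option Int) (m : Int) : Bool :=
  match o with
  | some j => decide (m - j ≤ w)
  | none => false

def pvScanB (set_a : List String) (set_b : List String) (w : Int) :
    Int → Option Int → Option Int → List String → Bool
  | _, _, _, [] => false
  | i, la, lb, s :: rest =>
    let a := set_a.any (fun k => PySem.Str.isIn k s)
    let b := set_b.any (fun k => PySem.Str.isIn k s)
    let la' := if a then some i else la
    let lb' := if b then some i else lb
    if a && pvNearB w lb' i then true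
    else if b && pvNearB w la' i then true
    else pvScanB set_a set_b w (i + 1) la' lb' rest

def proximity_hit_py_alt (lower_strings : List String) (set_a : List String) (set_b : List String) (window : Int) : Bool :=
  pvScanB set_a set_b window 0 none none lower_strings

-- ===== PRECONDITION & SPEC =====
def Spec_proximity_hit_py (lower_strings : List String) (set_a : List String) (set_b : List String) (window : Int) (out : Bool) : Prop := out = proximity_hit_py_alt lower_strings set_a set_b window
instance (lower_strings : List String) (set_a : List String) (set_b : List String) (window : Int) (out : Bool) : Decidable (Spec_proximity_hit_py lower_strings set_a set_b window out) := by unfold Spec_proximity_hit_py; infer_instance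

-- ===== CLAIM (what is proved, stated in full; the proofs are below) =====
def Claim_equal_proximity_hit_py : Prop := ∀ (lower_strings : List String) (set_a : List String) (set_b : List String) (window : Int), Dom_proximity_hit_py lower_strings set_a set_b window → Spec_proximity_hit_py lower_strings set_a set_b window (proximity_hit_py lower_strings set_a set_b window)

-- ===== LEMMAS AND PROOFS =====

def pvNear (w : Int) (o : Option Int) (m : Int) : Prop := ∃ j, o = some j ∧ m - j ≤ w

def pvHitR (sa sb : List String) (w i : Int) (la lb : Option Int) (xs : List String) : Prop :=
  (∃ (p : Nat) (_ : p < xs.length) (q : Nat) (_ : q < xs.length),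
      sa.any (fun k => PySem.Str.isIn k xs[p]) = true ∧
      sb.any (fun k => PySem.Str.isIn k xs[q]) = true ∧ |(p : Int) - (q : Int)| ≤ w)
  ∨ (∃ (q : Nat) (_ : q < xs.length),
      sb.any (fun k => PySem.Str.isIn k xs[q]) = true ∧ pvNear w la (i + (q : Int)))
  ∨ (∃ (p : Nat) (_ : p < xs.length),
      sa.any (fun k => PySem.Str.isIn k xs[p]) = true ∧ pvNear w lb (i + (p : Int)))

lemma pvNearB_iff (w : Int) (o : Option Int) (m : Int) :
    pvNearB w o m = true ↔ pvNear w o m := by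
  cases o <;> simp [pvNearB, pvNear]

lemma pv_abs_succ (p q : Nat) (w : Int) :
    |((p + 1 : Nat) : Int) - ((q + 1 : Nat) : Int)| ≤ w ↔ |(p : Int) - (q : Int)| ≤ w := by
  rw [abs_le, abs_le]; omega

-- a hit detected on the suffix with unchanged carried state is a hit on the extended suffix
lemma pv_hit_shift (sa sb : List String) (w i : Int) (la lb : Option Int) (s : String)
    (rest : List String) (h : pvHitR sa sb w (i + 1) la lb rest) :
    pvHitR sa sb w i la lb (s :: rest) := by
  rcases h with ⟨p, hp, q, hq, hma, hmb, habs⟩ | ⟨q, hq, hmb, j, hj, hle⟩ | ⟨p, hp, hma, j, hj, hle⟩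
  · exact Or.inl ⟨p + 1, by simp; omega, q + 1, by simp; omega,
      by simpa using hma, by simpa using hmb, (pv_abs_succ p q w).mpr habs⟩
  · exact Or.inr (Or.inl ⟨q + 1, by simp; omega, by simpa using hmb, j, hj, by omega⟩)
  · exact Or.inr (Or.inr ⟨p + 1, by simp; omega, by simpa using hma, j, hj, by omega⟩)

lemma pv_scan_iff (sa sb : List String) (w : Int) :
    ∀ (xs : List String) (i : Int) (la lb : Option Int),
      (∀ j, la = some j → j < i) → (∀ j, lb = some j → j < i) →
      (pvScanB sa sb w i la lb xs = true ↔ pvHitR sa sb w i la lb xs) := by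
  intro xs
  induction xs with
  | nil =>
    intro i la lb _ _
    simp [pvScanB, pvHitR]
  | cons s rest ih =>
    intro i la lb hla hlb
    by_cases ha : (sa.any fun k => PySem.Str.isIn k s) = true
    · by_cases hb : (sb.any fun k => PySem.Str.isIn k s) = true
      · -- both sets match s : the pass records index i on both sides
        have hstep : pvScanB sa sb w i la lb (s :: rest) =
            (pvNearB w (some i) i || (pvNearB w (some i) i ||
              pvScanB sa sb w (i + 1) (some i) (some i) rest)) := by
          simp only [pvScanB, ha, hb, if_true, Bool.true_and]
          cases hc : pvNearB w (some i) i <;> simp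
        rw [hstep, Bool.or_eq_true, Bool.or_eq_true, pvNearB_iff,
          ih (i + 1) (some i) (some i)
            (by rintro j hj; injection hj with hj; omega)
            (by rintro j hj; injection hj with hj; omega)]
        constructor
        · rintro (⟨j, hj, hle⟩ | ⟨j, hj, hle⟩ | hrest)
          · injection hj with hj; subst hj
            exact Or.inl ⟨0, by simp, 0, by simp, by simpa using ha, by simpa using hb,
              by rw [abs_le]; omega⟩
          · injection hj with hj; subst hj
            exact Or.inl ⟨0, by simp, 0, by simp, by simpa using ha, by simpa using hb,
              by rw [abs_le]; omega⟩
          · rcases hrest with ⟨p, hp, q, hq, hma, hmb, habs⟩ | ⟨q, hq, hmb, j, hj, hle⟩ | ⟨p, hp, hma, j, hj, hle⟩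
            · exact Or.inl ⟨p + 1, by simp; omega, q + 1, by simp; omega,
                by simpa using hma, by simpa using hmb, (pv_abs_succ p q w).mpr habs⟩
            · injection hj with hj; subst hj
              exact Or.inl ⟨0, by simp, q + 1, by simp; omega, by simpa using ha,
                by simpa using hmb, by rw [abs_le]; omega⟩
            · injection hj with hj; subst hj
              exact Or.inl ⟨p + 1, by simp; omega, 0, by simp, by simpa using hma,
                by simpa using hb, by rw [abs_le]; omega⟩
        · rintro (⟨p, hp, q, hq, hma, hmb, habs⟩ | ⟨q, hq, hmb, j, hj, hle⟩ | ⟨p, hp, hma, j, hj, hle⟩)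
          · rw [abs_le] at habs
            exact Or.inl ⟨i, rfl, by omega⟩
          · have := hla j hj
            exact Or.inl ⟨i, rfl, by omega⟩
          · have := hlb j hj
            exact Or.inl ⟨i, rfl, by omega⟩
      · -- only set_a matches s
        have hb' : (sb.any fun k => PySem.Str.isIn k s) = false := by simpa using hb
        have hstep : pvScanB sa sb w i la lb (s :: rest) =
            (pvNearB w lb i || pvScanB sa sb w (i + 1) (some i) lb rest) := by
          simp only [pvScanB, ha, hb', if_true, Bool.true_and, Bool.false_and]
          cases hc : pvNearB w lb i <;> simp [hc]
        rw [hstep, Bool.or_eq_true, pvNearB_iff,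
          ih (i + 1) (some i) lb
            (by rintro j hj; injection hj with hj; omega)
            (by intro j hj; have := hlb j hj; omega)]
        constructor
        · rintro (⟨j, hj, hle⟩ | hrest)
          · exact Or.inr (Or.inr ⟨0, by simp, by simpa using ha, j, hj, by omega⟩)
          · rcases hrest with ⟨p, hp, q, hq, hma, hmb, habs⟩ | ⟨q, hq, hmb, j, hj, hle⟩ | ⟨p, hp, hma, j, hj, hle⟩
            · exact Or.inl ⟨p + 1, by simp; omega, q + 1, by simp; omega,
                by simpa using hma, by simpa using hmb, (pv_abs_succ p q w).mpr habs⟩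
            · injection hj with hj; subst hj
              exact Or.inl ⟨0, by simp, q + 1, by simp; omega, by simpa using ha,
                by simpa using hmb, by rw [abs_le]; omega⟩
            · exact Or.inr (Or.inr ⟨p + 1, by simp; omega, by simpa using hma, j, hj,
                by omega⟩)
        · rintro (⟨p, hp, q, hq, hma, hmb, habs⟩ | ⟨q, hq, hmb, j, hj, hle⟩ | ⟨p, hp, hma, j, hj, hle⟩)
          · rcases q with _ | q
            · rw [List.getElem_cons_zero] at hmb
              rw [hmb] at hb'; cases hb'
            · rcases p with _ | p
              · rw [abs_le] at habs
                exact Or.inr (Or.inr (Or.inl ⟨q, by simpa using hq, by simpa using hmb,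
                  i, rfl, by omega⟩))
              · rw [List.getElem_cons_succ] at hma hmb
                exact Or.inr (Or.inl ⟨p, by simpa using hp, q, by simpa using hq, hma, hmb,
                  (pv_abs_succ p q w).mp habs⟩)
          · rcases q with _ | q
            · rw [List.getElem_cons_zero] at hmb
              rw [hmb] at hb'; cases hb'
            · have := hla j hj
              exact Or.inr (Or.inr (Or.inl ⟨q, by simpa using hq, by simpa using hmb,
                i, rfl, by omega⟩))
          · rcases p with _ | p
            · exact Or.inl ⟨j, hj, by omega⟩
            · exact Or.inr (Or.inr (Or.inr ⟨p, by simpa using hp, by simpa using hma,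
                j, hj, by omega⟩))
    · have ha' : (sa.any fun k => PySem.Str.isIn k s) = false := by simpa using ha
      by_cases hb : (sb.any fun k => PySem.Str.isIn k s) = true
      · -- only set_b matches s
        have hstep : pvScanB sa sb w i la lb (s :: rest) =
            (pvNearB w la i || pvScanB sa sb w (i + 1) la (some i) rest) := by
          simp only [pvScanB, ha', hb, if_true, Bool.true_and, Bool.false_and]
          cases hc : pvNearB w la i <;> simp [hc]
        rw [hstep, Bool.or_eq_true, pvNearB_iff,
          ih (i + 1) la (some i)
            (by intro j hj; have := hla j hj; omega)
            (by rintro j hj; injection hj with hj; omega)]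
        constructor
        · rintro (⟨j, hj, hle⟩ | hrest)
          · exact Or.inr (Or.inl ⟨0, by simp, by simpa using hb, j, hj, by omega⟩)
          · rcases hrest with ⟨p, hp, q, hq, hma, hmb, habs⟩ | ⟨q, hq, hmb, j, hj, hle⟩ | ⟨p, hp, hma, j, hj, hle⟩
            · exact Or.inl ⟨p + 1, by simp; omega, q + 1, by simp; omega,
                by simpa using hma, by simpa using hmb, (pv_abs_succ p q w).mpr habs⟩
            · exact Or.inr (Or.inl ⟨q + 1, by simp; omega, by simpa using hmb, j, hj,
                by omega⟩)
            · injection hj with hj; subst hj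
              exact Or.inl ⟨p + 1, by simp; omega, 0, by simp, by simpa using hma,
                by simpa using hb, by rw [abs_le]; omega⟩
        · rintro (⟨p, hp, q, hq, hma, hmb, habs⟩ | ⟨q, hq, hmb, j, hj, hle⟩ | ⟨p, hp, hma, j, hj, hle⟩)
          · rcases p with _ | p
            · rw [List.getElem_cons_zero] at hma
              rw [hma] at ha'; cases ha'
            · rcases q with _ | q
              · rw [abs_le] at habs
                exact Or.inr (Or.inr (Or.inr ⟨p, by simpa using hp, by simpa using hma,
                  i, rfl, by omega⟩))
              · rw [List.getElem_cons_succ] at hma hmb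
                exact Or.inr (Or.inl ⟨p, by simpa using hp, q, by simpa using hq, hma, hmb,
                  (pv_abs_succ p q w).mp habs⟩)
          · rcases q with _ | q
            · exact Or.inl ⟨j, hj, by omega⟩
            · exact Or.inr (Or.inr (Or.inl ⟨q, by simpa using hq, by simpa using hmb,
                j, hj, by omega⟩))
          · rcases p with _ | p
            · rw [List.getElem_cons_zero] at hma
              rw [hma] at ha'; cases ha'
            · have := hlb j hj
              exact Or.inr (Or.inr (Or.inr ⟨p, by simpa using hp, by simpa using hma,
                i, rfl, by omega⟩))
      · -- neither set matches s
        have hb' : (sb.any fun k => PySem.Str.isIn k s) = false := by simpa using hb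
        have hstep : pvScanB sa sb w i la lb (s :: rest) =
            pvScanB sa sb w (i + 1) la lb rest := by
          simp only [pvScanB, ha', hb', Bool.false_and]
          simp
        rw [hstep,
          ih (i + 1) la lb
            (by intro j hj; have := hla j hj; omega)
            (by intro j hj; have := hlb j hj; omega)]
        constructor
        · exact pv_hit_shift sa sb w i la lb s rest
        · rintro (⟨p, hp, q, hq, hma, hmb, habs⟩ | ⟨q, hq, hmb, j, hj, hle⟩ | ⟨p, hp, hma, j, hj, hle⟩)
          · rcases p with _ | p
            · rw [List.getElem_cons_zero] at hma
              rw [hma] at ha'; cases ha'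
            · rcases q with _ | q
              · rw [List.getElem_cons_zero] at hmb
                rw [hmb] at hb'; cases hb'
              · rw [List.getElem_cons_succ] at hma hmb
                exact Or.inl ⟨p, by simpa using hp, q, by simpa using hq, hma, hmb,
                  (pv_abs_succ p q w).mp habs⟩
          · rcases q with _ | q
            · rw [List.getElem_cons_zero] at hmb
              rw [hmb] at hb'; cases hb'
            · exact Or.inr (Or.inl ⟨q, by simpa using hq, by simpa using hmb, j, hj,
                by omega⟩)
          · rcases p with _ | p
            · rw [List.getElem_cons_zero] at hma
              rw [hma] at ha'; cases ha'
            · exact Or.inr (Or.inr ⟨p, by simpa using hp, by simpa using hma, j, hj,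
                by omega⟩)

lemma pv_alt_iff (ls sa sb : List String) (w : Int) :
    proximity_hit_py_alt ls sa sb w = true ↔
      (∃ (p : Nat) (_ : p < ls.length) (q : Nat) (_ : q < ls.length),
        sa.any (fun k => PySem.Str.isIn k ls[p]) = true ∧
        sb.any (fun k => PySem.Str.isIn k ls[q]) = true ∧ |(p : Int) - (q : Int)| ≤ w) := by
  rw [proximity_hit_py_alt, pv_scan_iff sa sb w ls 0 none none (by simp) (by simp)]
  simp [pvHitR, pvNear]

lemma pv_a_iff (ls sa sb : List String) (w : Int) :
    proximity_hit_py ls sa sb w = true ↔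
      (∃ (p : Nat) (_ : p < ls.length) (q : Nat) (_ : q < ls.length),
        sa.any (fun k => PySem.Str.isIn k ls[p]) = true ∧
        sb.any (fun k => PySem.Str.isIn k ls[q]) = true ∧ |(p : Int) - (q : Int)| ≤ w) := by
  simp only [proximity_hit_py]
  split_ifs with h1 h2
  · constructor
    · intro h; simp at h
    · rintro ⟨p, hp, q, hq, hma, hmb, _⟩
      exfalso
      have : ((p : Int), ls[p]) ∈ (PySem.List.enumerate ls 0).filter (fun p => sa.any (fun k => PySem.Str.isIn k p.2)) := by
        rw [List.mem_filter]
        exact ⟨by rw [PySem.List.mem_enumerate_iff]; exact ⟨p, hp, by simp⟩, hma⟩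
      have := List.mem_map_of_mem (f := fun p => p.1) this
      rw [h1] at this
      simp at this
  · constructor
    · intro h; simp at h
    · rintro ⟨p, hp, q, hq, hma, hmb, _⟩
      exfalso
      have : ((q : Int), ls[q]) ∈ (PySem.List.enumerate ls 0).filter (fun p => sb.any (fun k => PySem.Str.isIn k p.2)) := by
        rw [List.mem_filter]
        exact ⟨by rw [PySem.List.mem_enumerate_iff]; exact ⟨q, hq, by simp⟩, hmb⟩
      have := List.mem_map_of_mem (f := fun p => p.1) this
      have h3 : ((q:Int)) ∈ PySem.Set.ofList (((PySem.List.enumerate ls 0).filter (fun p => sb.any (fun k => PySem.Str.isIn k p.2))).map (fun p => p.1)) := by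
        rw [PySem.Set.mem_ofList]; exact this
      rw [h2] at h3; simp at h3
  · rw [List.any_eq_true]
    constructor
    · rintro ⟨ia, hia, hinner⟩
      rw [List.mem_map] at hia
      obtain ⟨pr, hpr, rfl⟩ := hia
      rw [List.mem_filter] at hpr
      obtain ⟨hmem, hma⟩ := hpr
      rw [PySem.List.mem_enumerate_iff] at hmem
      obtain ⟨p, hp, rfl⟩ := hmem
      rw [List.any_eq_true] at hinner
      obtain ⟨ib, hib, habs⟩ := hinner
      rw [PySem.Set.mem_ofList, List.mem_map] at hib
      obtain ⟨pr2, hpr2, rfl⟩ := hib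
      rw [List.mem_filter] at hpr2
      obtain ⟨hmem2, hmb⟩ := hpr2
      rw [PySem.List.mem_enumerate_iff] at hmem2
      obtain ⟨q, hq, rfl⟩ := hmem2
      simp only [decide_eq_true_eq] at habs
      exact ⟨p, hp, q, hq, hma, hmb, by simpa using habs⟩
    · rintro ⟨p, hp, q, hq, hma, hmb, habs⟩
      refine ⟨(p : Int), ?_, ?_⟩
      · rw [List.mem_map]
        refine ⟨((p:Int), ls[p]), ?_, rfl⟩
        rw [List.mem_filter]
        exact ⟨by rw [PySem.List.mem_enumerate_iff]; exact ⟨p, hp, by simp⟩, hma⟩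
      · rw [List.any_eq_true]
        refine ⟨(q : Int), ?_, by simpa using habs⟩
        rw [PySem.Set.mem_ofList, List.mem_map]
        refine ⟨((q:Int), ls[q]), ?_, rfl⟩
        rw [List.mem_filter]
        exact ⟨by rw [PySem.List.mem_enumerate_iff]; exact ⟨q, hq, by simp⟩, hmb⟩

-- ===== VERDICT (by name: the statement is the Claim_ definition above) =====
theorem proximity_hit_py_spec : Claim_equal_proximity_hit_py := by
  intro ls sa sb w _
  unfold Spec_proximity_hit_py
  rw [Bool.eq_iff_iff, pv_a_iff, pv_alt_iff]
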